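-- pv_equiv track=rewrite | github.com/ai-agents-2030/SPA-Bench | pipeline/cross_evaluator.py | stage_1_checker
-- ===== SOURCE A (Python) =====
-- def stage_1_checker(app_dict, length):
--     # Loop through the dictionary elements
--     app_list = list(app_dict.items())  # Convert dictionary items into a list of tuples
--
--     for name, (start, end) in app_list:
--         # Case 1: if either start or end is -1
--         if start == -1 or end == -1:
--             return False
--
--         # Case 2: if start is bigger than end
--         if start > end:
--             return False
--
--         # Case 3: if start or end is bigger than length
--         if start > length or end > length:
--             return False
--
--     # Loop through the dictionary elements again to check the order condition
--     for i in range(len(app_list) - 1):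
--         current_name, (current_start, current_end) = app_list[i]
--         next_name, (next_start, next_end) = app_list[i + 1]
--
--         # Case 4: if the current app's end time is greater or equal to the next app's start time
--         if current_end >= next_start:
--             return False
--
--     # If none of the cases return False, return True
--     return True
-- ===== SOURCE B (Python) =====
-- def stage_1_checker(app_dict, length):
--     # Flatten all endpoints into one sequence and check it as an alternating
--     # monotone chain: even-indexed adjacent pairs (start, end of the same app)
--     # must be <=, odd-indexed pairs (end, next start) must be <.
--     ts = [t for se in app_dict.values() for t in se]
--     if any(t == -1 or t > length for t in ts):
--         return False
--     return all(a <= b if i % 2 == 0 else a < b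
--                for i, (a, b) in enumerate(zip(ts, ts[1:])))
-- ===== Notes on version B (the rewrite author's own statement) =====
-- stated objective: alternative
-- what changed: A loops per interval with four guard branches plus a second indexed loop over consecutive entries; B flattens all endpoints into one sequence and checks a single alternating monotone chain (<= within an interval, < between intervals) plus one membership/bound scan.
import Mathlib
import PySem

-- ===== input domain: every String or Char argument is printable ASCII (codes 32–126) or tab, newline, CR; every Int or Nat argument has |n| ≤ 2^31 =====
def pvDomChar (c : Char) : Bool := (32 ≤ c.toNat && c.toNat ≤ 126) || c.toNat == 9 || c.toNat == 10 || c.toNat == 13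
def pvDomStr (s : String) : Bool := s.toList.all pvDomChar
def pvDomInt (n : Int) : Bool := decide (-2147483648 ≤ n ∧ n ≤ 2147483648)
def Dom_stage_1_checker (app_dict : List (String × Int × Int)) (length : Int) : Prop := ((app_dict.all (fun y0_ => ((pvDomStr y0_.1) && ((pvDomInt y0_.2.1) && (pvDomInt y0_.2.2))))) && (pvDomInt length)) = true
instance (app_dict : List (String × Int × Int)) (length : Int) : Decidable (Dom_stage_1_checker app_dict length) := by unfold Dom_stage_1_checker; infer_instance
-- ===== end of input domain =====

-- B flattens all endpoints into one sequence and checks it as a single alternating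
-- monotone chain plus one bound scan, instead of A's per-interval guards and second
-- indexed ordering loop; same return value (objective: alternative).


-- ===== PORT A =====
-- First loop of A: validate every entry, early return False.
def pvValidLoop (app_list : List (String × Int × Int)) (length : Int) : Bool :=
  match app_list with
  | [] => true
  | (_, start, «end») :: rest =>
    if start == -1 || «end» == -1 then false
    else if start > «end» then false
    else if start > length || «end» > length then false
    else pvValidLoop rest length

-- Second loop of A: for i in range(len(app_list) - 1), compare app_list[i] with app_list[i+1].
def pvOrderLoop (app_list : List (String × Int × Int)) (i : Nat) : Bool :=
  if h : i + 1 < app_list.length then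
    if (app_list[i]).2.2 ≥ (app_list[i + 1]).2.1 then false else pvOrderLoop app_list (i + 1)
  else true
termination_by app_list.length - i

def stage_1_checker (app_dict : List (String × Int × Int)) (length : Int) : Bool :=
  if pvValidLoop app_dict length = false then false
  else pvOrderLoop app_dict 0

-- ===== PORT B =====
-- ts = [t for se in app_dict.values() for t in se]
-- if any(t == -1 or t > length for t in ts): return False
-- return all(a <= b if i % 2 == 0 else a < b for i, (a, b) in enumerate(zip(ts, ts[1:])))
def stage_1_checker_alt (app_dict : List (String × Int × Int)) (length : Int) : Bool :=
  let ts := app_dict.flatMap (fun se => [se.2.1, se.2.2])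
  if ts.any (fun t => t == -1 || t > length) then false
  else (PySem.List.enumerate (ts.zip (PySem.List.slice ts (some 1) none)) 0).all
        (fun p => if PySem.Int.mod p.1 2 == 0 then p.2.1 ≤ p.2.2 else p.2.1 < p.2.2)

-- ===== PRECONDITION & SPEC =====
def Spec_stage_1_checker (app_dict : List (String × Int × Int)) (length : Int) (out : Bool) : Prop := out = stage_1_checker_alt app_dict length
instance (app_dict : List (String × Int × Int)) (length : Int) (out : Bool) : Decidable (Spec_stage_1_checker app_dict length out) := by unfold Spec_stage_1_checker; infer_instance

-- ===== CLAIM =====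
def Claim_equal_stage_1_checker : Prop := ∀ (app_dict : List (String × Int × Int)) (length : Int), Dom_stage_1_checker app_dict length → Spec_stage_1_checker app_dict length (stage_1_checker app_dict length)

-- ===== LEMMAS AND PROOFS =====

-- Alternating chain over a flat list: parity = false expects ≤ at the head pair, true expects <.
def pvChainAlt (parity : Bool) : List Int → Bool
  | [] => true
  | [_] => true
  | a :: b :: rest => (if parity then a < b else a ≤ b) && pvChainAlt (!parity) (b :: rest)

def pvFlat (xs : List (String × Int × Int)) : List Int := xs.flatMap (fun se => [se.2.1, se.2.2])

-- "prev_end >= next start" head check used to characterise the ordering loop.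
def pvHeadOk (p : Int) (xs : List (String × Int × Int)) : Bool :=
  match xs with
  | [] => true
  | (_, s, _) :: _ => !(p ≥ s)

lemma pvOrderLoop_shift_aux (x : String × Int × Int) :
    ∀ (n : Nat) (xs : List (String × Int × Int)) (i : Nat), xs.length ≤ i + n →
      pvOrderLoop (x :: xs) (i + 1) = pvOrderLoop xs i := by
  intro n
  induction n with
  | zero =>
    intro xs i h
    conv_lhs => rw [pvOrderLoop.eq_def]
    conv_rhs => rw [pvOrderLoop.eq_def]
    rw [dif_neg (by simp only [List.length_cons]; omega), dif_neg (by omega)]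
  | succ n ih =>
    intro xs i h
    by_cases hlt : i + 1 < xs.length
    · conv_lhs => rw [pvOrderLoop.eq_def]
      conv_rhs => rw [pvOrderLoop.eq_def]
      rw [dif_pos (by simp only [List.length_cons]; omega), dif_pos hlt]
      simp only [List.getElem_cons_succ]
      by_cases hc : xs[i].2.2 ≥ xs[i + 1].2.1
      · simp only [hc, if_true]
      · simp only [hc, if_false, ih xs (i + 1) (by omega)]
    · conv_lhs => rw [pvOrderLoop.eq_def]
      conv_rhs => rw [pvOrderLoop.eq_def]
      rw [dif_neg (by simp only [List.length_cons]; omega), dif_neg hlt]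

lemma pvOrderLoop_cons_succ (x : String × Int × Int) (xs : List (String × Int × Int)) (i : Nat) :
    pvOrderLoop (x :: xs) (i + 1) = pvOrderLoop xs i :=
  pvOrderLoop_shift_aux x xs.length xs i (by omega)

lemma pvOrderLoop_cons (x : String × Int × Int) (xs : List (String × Int × Int)) :
    pvOrderLoop (x :: xs) 0 = (pvHeadOk x.2.2 xs && pvOrderLoop xs 0) := by
  obtain ⟨n, s, e⟩ := x
  cases xs with
  | nil => simp [pvHeadOk, pvOrderLoop]
  | cons y ys =>
    obtain ⟨n', s', e'⟩ := y
    conv_lhs => rw [pvOrderLoop.eq_def]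
    rw [dif_pos (by simp)]
    simp only [List.getElem_cons_zero, List.getElem_cons_succ]
    rw [pvOrderLoop_cons_succ]
    by_cases h : e ≥ s' <;> simp [pvHeadOk, h]

-- A's first loop equals: no endpoint is -1 or > length, and every interval has start ≤ end.
lemma pvValidLoop_eq (xs : List (String × Int × Int)) (length : Int) :
    pvValidLoop xs length
      = (!(pvFlat xs).any (fun t => t == -1 || t > length)
          && xs.all (fun x => x.2.1 ≤ x.2.2)) := by
  induction xs with
  | nil => simp [pvValidLoop, pvFlat]
  | cons x rest ih =>
    obtain ⟨n, s, e⟩ := x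
    rw [pvValidLoop]
    simp only [pvFlat, List.flatMap_cons, List.any_append, List.any_cons, List.any_nil,
      List.all_cons] at *
    by_cases h1 : s == -1 || e == -1
    · rcases Bool.or_eq_true_iff.mp h1 with h | h <;> simp_all
    · simp only [h1]
      by_cases h2 : s > e
      · simp only [h2, if_true]
        have : ¬ (s ≤ e) := by omega
        simp [this]
      · simp only [h2, if_false]
        by_cases h3 : s > length || e > length
        · rcases Bool.or_eq_true_iff.mp h3 with h | h <;> simp_all
        · rw [not_lt] at h2
          simp only [Bool.or_eq_true_iff, not_or] at h1 h3
          simp only [beq_iff_eq] at h1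
          rw [ih]
          simp only [decide_eq_true_eq] at h3 ⊢
          have hs : (s == (-1 : Int)) = false := by simp [h1.1]
          have he : (e == (-1 : Int)) = false := by simp [h1.2]
          have hs2 : decide (s > length) = false := by simp; omega
          have he2 : decide (e > length) = false := by simp; omega
          have hse : decide (s ≤ e) = true := by simp [h2]
          simp [hs, he, hs2, he2, hse]

-- The enumerate/zip alternating-pair check equals pvChainAlt at the start index's parity.
lemma pvEnumChain (ts : List Int) : ∀ (k : Int),
    ((PySem.List.enumerate (ts.zip ts.tail) k).all
        (fun p => if PySem.Int.mod p.1 2 == 0 then p.2.1 ≤ p.2.2 else p.2.1 < p.2.2))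
      = pvChainAlt (!(PySem.Int.mod k 2 == 0)) ts := by
  induction ts with
  | nil => intro k; simp [PySem.List.enumerate_nil, pvChainAlt]
  | cons a rest ih =>
    intro k
    cases rest with
    | nil => simp [PySem.List.enumerate_nil, pvChainAlt]
    | cons b r =>
      have hz : (a :: b :: r).zip (a :: b :: r).tail = (a, b) :: (b :: r).zip ((b :: r).tail) := by
        simp
      rw [hz, PySem.List.enumerate_cons, List.all_cons, ih (k + 1)]
      have hpar : (PySem.Int.mod (k + 1) 2 == 0) = !(PySem.Int.mod k 2 == 0) := by
        rw [show PySem.Int.mod k 2 = k % 2 from PySem.Int.mod_eq_emod_of_pos (by omega),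
            show PySem.Int.mod (k + 1) 2 = (k + 1) % 2 from PySem.Int.mod_eq_emod_of_pos (by omega)]
        rcases Int.emod_two_eq_zero_or_one k with h | h
        · have : (k + 1) % 2 = 1 := by omega
          simp [h, this]
        · have : (k + 1) % 2 = 0 := by omega
          simp [h, this]
      rw [hpar, pvChainAlt]
      cases hk : (PySem.Int.mod k 2 == 0) <;> simp

-- The alternating chain on the flattened list = (every start ≤ end) ∧ A's ordering loop.
lemma pvChainAlt_flat (xs : List (String × Int × Int)) :
    pvChainAlt false (pvFlat xs) = (xs.all (fun x => x.2.1 ≤ x.2.2) && pvOrderLoop xs 0) := by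
  induction xs with
  | nil => simp [pvFlat, pvChainAlt, pvOrderLoop]
  | cons x rest ih =>
    obtain ⟨n, s, e⟩ := x
    rw [pvOrderLoop_cons]
    cases rest with
    | nil =>
      simp only [pvFlat, List.flatMap_cons, List.flatMap_nil]
      simp [pvChainAlt, pvHeadOk, pvOrderLoop]
    | cons y r =>
      obtain ⟨n', s', e'⟩ := y
      have hf : pvFlat ((n, s, e) :: (n', s', e') :: r) = s :: e :: pvFlat ((n', s', e') :: r) := by
        simp [pvFlat]
      have hf2 : pvFlat ((n', s', e') :: r) = s' :: e' :: pvFlat r := by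
        simp [pvFlat]
      rw [hf, pvChainAlt, hf2, pvChainAlt, ← hf2]
      simp only [Bool.not_false, Bool.not_true, Bool.false_eq_true, if_false, if_true, ih]
      simp only [pvHeadOk, List.all_cons]
      have : decide (e < s') = !decide (e ≥ s') := by
        by_cases h : e < s' <;> simp [h] <;> omega
      rw [this]
      generalize decide (s ≤ e) = b0
      generalize decide (e ≥ s') = b1
      generalize (decide (s' ≤ e') && List.all r fun x => decide (x.2.1 ≤ x.2.2)) = b2
      generalize pvOrderLoop ((n', s', e') :: r) 0 = b3
      cases b0 <;> cases b1 <;> cases b2 <;> cases b3 <;> simp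

-- ===== VERDICT =====
theorem stage_1_checker_spec : Claim_equal_stage_1_checker := by
  intro app_dict length _
  unfold Spec_stage_1_checker stage_1_checker stage_1_checker_alt
  simp only [PySem.List.slice_from_one, pvEnumChain]
  have h0 : (!(PySem.Int.mod (0:Int) 2 == 0)) = false := by decide
  rw [h0, show List.flatMap (fun se => [se.2.1, se.2.2]) app_dict = pvFlat app_dict from rfl,
      pvChainAlt_flat, pvValidLoop_eq]
  cases hb : (pvFlat app_dict).any (fun t => t == -1 || t > length)
  · simp
  · simp
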